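-- pv_equiv track=rewrite | github.com/c-i-a-s-t-e-k/AlgoTrudneObliczeniowo | lab4/lab4.py | simplifyClause
-- ===== SOURCE A (Python) =====
-- def simplifyClause( C:list, V:dict):
--   # C - klauzula, czyli lista literałów
--   # V - wartościowanie zmiennych
--     if C == []:
--         return C
--
--     ans = []
--     for i in C:
--         if i not in V: ans.append(i)
--         elif V[i]*i > 0:
--             return None
--         elif V[i]*i < 0:
--             continue
--     return ans
-- ===== SOURCE B (Python) =====
-- def simplifyClause(C: list, V: dict):
--     if C == []:
--         return C
--     if any(i in V and V[i] * i > 0 for i in C):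
--         return None
--     return [i for i in C if i not in V]
-- ===== Notes on version B (the rewrite author's own statement) =====
-- stated objective: simpler
-- what changed: Replaces A's single stateful loop with early return and an accumulator by two declarative passes: an any() satisfaction test followed by a filter of unassigned literals.
import Mathlib
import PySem

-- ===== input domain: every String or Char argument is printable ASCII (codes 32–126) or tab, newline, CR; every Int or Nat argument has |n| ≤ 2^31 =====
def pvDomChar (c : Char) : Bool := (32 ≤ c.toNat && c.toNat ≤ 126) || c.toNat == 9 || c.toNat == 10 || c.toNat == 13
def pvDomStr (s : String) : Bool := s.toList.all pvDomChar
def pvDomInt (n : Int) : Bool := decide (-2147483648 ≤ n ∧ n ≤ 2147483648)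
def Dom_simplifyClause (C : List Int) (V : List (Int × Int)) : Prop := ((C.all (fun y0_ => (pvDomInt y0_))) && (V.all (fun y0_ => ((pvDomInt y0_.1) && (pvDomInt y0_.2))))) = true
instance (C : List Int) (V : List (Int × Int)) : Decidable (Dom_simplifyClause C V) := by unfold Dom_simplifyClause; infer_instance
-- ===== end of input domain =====

-- B replaces A's single stateful loop (accumulator + early return) by two declarative passes:
-- an any-satisfied test, then a filter of unassigned literals. Objective: simpler.

-- dict lookup: first matching key (Python dict keys are unique; first match is exact)
def pvGetV (V : List (Int × Int)) (i : Int) : Option Int :=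
  (V.find? (fun p => p.1 == i)).map (·.2)

-- ===== PORT A =====
def simplifyClauseLoop (V : List (Int × Int)) : List Int → List Int → Option (List Int)
  | [], ans => some ans
  | i :: rest, ans =>
    match pvGetV V i with
    | none => simplifyClauseLoop V rest (ans ++ [i])
    | some v =>
      if v * i > 0 then none
      else simplifyClauseLoop V rest ans

def simplifyClause (C : List Int) (V : List (Int × Int)) : Option (List Int) :=
  if C = [] then some C else simplifyClauseLoop V C []

-- ===== PORT B =====
def simplifyClause_alt (C : List Int) (V : List (Int × Int)) : Option (List Int) :=
  if C = [] then some C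
  else if C.any (fun i => match pvGetV V i with | some v => decide (v * i > 0) | none => false)
  then none
  else some (C.filter (fun i => (pvGetV V i).isNone))

-- ===== PRECONDITION & SPEC =====
def Spec_simplifyClause (C : List Int) (V : List (Int × Int)) (out : Option (List Int)) : Prop := out = simplifyClause_alt C V
instance (C : List Int) (V : List (Int × Int)) (out : Option (List Int)) : Decidable (Spec_simplifyClause C V out) := by unfold Spec_simplifyClause; infer_instance

-- ===== CLAIM (what is proved, stated in full; the proofs are below) =====
def Claim_equal_simplifyClause : Prop := ∀ (C : List Int) (V : List (Int × Int)), Dom_simplifyClause C V → Spec_simplifyClause C V (simplifyClause C V)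

-- ===== LEMMAS AND PROOFS =====
theorem simplifyClauseLoop_eq (V : List (Int × Int)) (C ans : List Int) :
    simplifyClauseLoop V C ans =
      if C.any (fun i => match pvGetV V i with | some v => decide (v * i > 0) | none => false)
      then none
      else some (ans ++ C.filter (fun i => (pvGetV V i).isNone)) := by
  induction C generalizing ans with
  | nil => simp [simplifyClauseLoop]
  | cons i rest ih =>
    simp only [simplifyClauseLoop]
    cases h : pvGetV V i with
    | none => simp [List.any_cons, h, ih]
    | some v =>
      by_cases hv : v * i > 0
      · simp [List.any_cons, h, hv]
      · simp [List.any_cons, h, hv, ih]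

-- ===== VERDICT (by name: the statement is the Claim_ definition above) =====
theorem simplifyClause_spec : Claim_equal_simplifyClause := by
  intro C V _
  unfold Spec_simplifyClause simplifyClause simplifyClause_alt
  by_cases hC : C = []
  · simp [hC]
  · simp [hC, simplifyClauseLoop_eq]
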